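-- pv_equiv track=rewrite | github.com/OmkarPh/AssignmentCodes | t2.py | idealDays
-- ===== SOURCE A (Python) =====
-- def idealDays(day, k):
--     n = len(day)
--     ideal_days = []
--     max_left = [0] * n
--     max_right = [0] * n
--
--     # Calculate the maximum values to the left of each day within the window
--     max_val = day[0]
--     for i in range(n):
--         if i % k == 0:
--             max_val = day[i]
--         else:
--             max_val = max(max_val, day[i])
--         max_left[i] = max_val
--
--     # Calculate the maximum values to the right of each day within the window
--     max_val = day[n - 1]
--     for i in range(n - 1, -1, -1):
--         if i == n - 1 or (i + 1) % k == 0: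
--             max_val = day[i]
--         else:
--             max_val = max(max_val, day[i])
--         max_right[i] = max_val
--
--     # Check for ideal days based on the calculated maximum values
--     for i in range(k, n - k):
--         if day[i] >= max_left[i] and day[i] >= max_right[i]:
--             ideal_days.append(i + 1)
--
--     return ideal_days
-- ===== SOURCE B (Python) =====
-- def idealDays(day, k):
--     n = len(day)
--     # one maximum per k-aligned block (the last slice auto-clamps at n)
--     blockmax = [max(day[bs:bs + k]) for bs in range(0, n, k)]
--     return [i + 1 for i in range(k, n - k) if day[i] == blockmax[i // k]]
-- ===== Notes on version B (the rewrite author's own statement) =====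
-- stated objective: simpler
-- what changed: B drops A's two precomputed prefix-max/suffix-max arrays and instead builds one maximum per k-aligned block (a C-level slice max per block), then in a single pass keeps i+1 when day[i] equals its block's maximum.
import Mathlib
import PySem

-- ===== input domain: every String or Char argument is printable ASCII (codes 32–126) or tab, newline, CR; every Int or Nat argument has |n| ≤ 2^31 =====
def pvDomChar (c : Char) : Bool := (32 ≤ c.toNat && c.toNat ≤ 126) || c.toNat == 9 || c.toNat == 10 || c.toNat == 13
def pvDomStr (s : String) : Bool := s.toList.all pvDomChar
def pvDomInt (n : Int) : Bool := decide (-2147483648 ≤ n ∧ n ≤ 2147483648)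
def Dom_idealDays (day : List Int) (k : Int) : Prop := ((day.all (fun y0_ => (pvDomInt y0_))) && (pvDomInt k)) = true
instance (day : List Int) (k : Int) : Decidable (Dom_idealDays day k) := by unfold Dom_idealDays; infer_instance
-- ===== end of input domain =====

-- B replaces A's two prefix/suffix running-max arrays by a direct per-index comparison
-- with the maximum of the k-aligned block (a slice max): simpler, one pass, no arrays.

-- ===== PORT A =====
-- first loop: max_val / max_left, i ascending; state = (max_val, max_left so far)
def idealDaysLeftStep (day : List Int) (k : Int) (st : Int × List Int) (i : Nat) : Int × List Int :=
  let mv := if PySem.Int.mod (i : Int) k = 0 then PySem.List.pyGetD day (i : Int) 0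
            else max st.1 (PySem.List.pyGetD day (i : Int) 0)
  (mv, st.2 ++ [mv])

-- second loop: max_val / max_right, i descending; filling max_right[i] descending = cons at front
def idealDaysRightStep (day : List Int) (k : Int) (n : Nat) (st : Int × List Int) (i : Nat) : Int × List Int :=
  let mv := if i = n - 1 ∨ PySem.Int.mod ((i : Int) + 1) k = 0 then PySem.List.pyGetD day (i : Int) 0
            else max st.1 (PySem.List.pyGetD day (i : Int) 0)
  (mv, mv :: st.2)

def idealDays (day : List Int) (k : Int) : List Int :=
  let n := day.length
  let left := (List.range n).foldl (idealDaysLeftStep day k) (PySem.List.pyGetD day 0 0, [])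
  let right := ((List.range n).reverse).foldl (idealDaysRightStep day k n)
      (PySem.List.pyGetD day ((n : Int) - 1) 0, [])
  (PySem.List.pyRange k ((n : Int) - k) 1).foldl
    (fun acc i =>
      if PySem.List.pyGetD day i 0 ≥ PySem.List.pyGetD left.2 i 0 ∧
         PySem.List.pyGetD day i 0 ≥ PySem.List.pyGetD right.2 i 0
      then acc ++ [i + 1] else acc) []

-- ===== PORT B =====
def idealDays_alt (day : List Int) (k : Int) : List Int :=
  let n := day.length
  let blockmax := (PySem.List.pyRange 0 (n : Int) k).map
      (fun bs => (PySem.List.max? (PySem.List.slice day (some bs) (some (bs + k))) (fun x => x)).getD 0)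
  (PySem.List.pyRange k ((n : Int) - k) 1).foldl
    (fun acc i =>
      if PySem.List.pyGetD day i 0 == PySem.List.pyGetD blockmax (PySem.Int.floordiv i k) 0
      then acc ++ [i + 1] else acc) []

-- ===== PRECONDITION & SPEC =====
-- Pre_ excludes exactly the inputs on which A raises: day = [] (IndexError at day[0]) and
-- k ≤ 0 (ZeroDivisionError at i % k for k = 0; for k < 0 the final loop always runs past
-- the end of max_left and raises IndexError, so A never returns there either).
def Pre_idealDays (day : List Int) (k : Int) : Prop := day ≠ [] ∧ 1 ≤ k
instance (day : List Int) (k : Int) : Decidable (Pre_idealDays day k) := by unfold Pre_idealDays; infer_instance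
def pvWitness_idealDays : List Int × Int := ([1, 3, 2, 5, 4, 1, 7, 2, 3], 3)

def Spec_idealDays (day : List Int) (k : Int) (out : List Int) : Prop := out = idealDays_alt day k
instance (day : List Int) (k : Int) (out : List Int) : Decidable (Spec_idealDays day k out) := by unfold Spec_idealDays; infer_instance

-- ===== CLAIM (what is proved, stated in full; the proofs are below) =====
def Claim_equal_idealDays : Prop := ∀ (day : List Int) (k : Int), Dom_idealDays day k → Pre_idealDays day k → Spec_idealDays day k (idealDays day k)

-- ===== LEMMAS AND PROOFS =====

-- day[j] for an in-range Nat index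
def pvG (day : List Int) (j : Nat) : Int := day.getD j 0
-- max of day[a..b] (inclusive), seeded at a — the quantity A's loops maintain
def pvM (day : List Int) (a b : Nat) : Int :=
  (List.range' (a + 1) (b - a)).foldl (fun acc j => max acc (pvG day j)) (pvG day a)
-- start of the k-aligned block containing j, and its (clamped) end
def pvLo (K j : Nat) : Nat := j - j % K
def pvE (K n j : Nat) : Nat := min (pvLo K j + K - 1) (n - 1)

theorem pvM_self (day : List Int) (a : Nat) : pvM day a a = pvG day a := by simp [pvM]

theorem pvM_succ (day : List Int) {a b : Nat} (h : a ≤ b) :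
    pvM day a (b + 1) = max (pvM day a b) (pvG day (b + 1)) := by
  unfold pvM
  have h1 : b + 1 - a = (b - a) + 1 := by omega
  rw [h1, List.range'_concat]
  have h2 : a + 1 + 1 * (b - a) = b + 1 := by omega
  rw [h2, List.foldl_append]
  rfl

theorem pvFoldlMax (day : List Int) (l : List Nat) (x y : Int) :
    l.foldl (fun acc j => max acc (pvG day j)) (max x y) =
      max x (l.foldl (fun acc j => max acc (pvG day j)) y) := by
  induction l generalizing y with
  | nil => rfl
  | cons a t ih => simp only [List.foldl_cons, max_assoc, ih]

theorem pvM_cons (day : List Int) {a b : Nat} (h : a < b) :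
    pvM day a b = max (pvG day a) (pvM day (a + 1) b) := by
  unfold pvM
  have h1 : b - a = (b - (a + 1)) + 1 := by omega
  rw [h1, List.range'_succ, List.foldl_cons]
  rw [pvFoldlMax]

theorem pvLe_M (day : List Int) {a j b : Nat} (h1 : a ≤ j) (h2 : j ≤ b) :
    pvG day j ≤ pvM day a b := by
  unfold pvM
  rcases Nat.eq_or_lt_of_le h1 with rfl | hlt
  · exact (PySem.List.le_foldl_max_int _ (pvG day) _).1
  · exact (PySem.List.le_foldl_max_int _ (pvG day) _).2 j (by
      rw [List.mem_range'_1]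
      omega)

theorem pvM_le_iff (day : List Int) {a b : Nat} (h : a ≤ b) (x : Int) :
    pvM day a b ≤ x ↔ ∀ j, a ≤ j → j ≤ b → pvG day j ≤ x := by
  constructor
  · intro hle j hj1 hj2
    exact le_trans (pvLe_M day hj1 hj2) hle
  · intro hall
    induction b with
    | zero => simpa [pvM, show a = 0 by omega] using hall 0 (by omega) (by omega)
    | succ b ih =>
      rcases Nat.eq_or_lt_of_le h with rfl | hlt
      · simpa [pvM] using hall (b + 1) le_rfl le_rfl
      · rw [pvM_succ day (by omega)]
        exact max_le (ih (by omega) (fun j hj1 hj2 => hall j hj1 (by omega)))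
          (hall (b + 1) (by omega) le_rfl)

theorem pvStep {K m : Nat} (hK : 1 ≤ K) :
    (m + 1) % K = (m % K + 1) % K := by
  conv_lhs => rw [Nat.add_mod]
  rcases Nat.eq_or_lt_of_le hK with rfl | h2
  · simp
  · rw [Nat.mod_eq_of_lt h2]

theorem pvSuccMod {K m : Nat} (hK : 1 ≤ K) (h : (m + 1) % K ≠ 0) :
    (m + 1) % K = m % K + 1 ∧ pvLo K (m + 1) = pvLo K m := by
  have hs := pvStep (m := m) hK
  have hr : m % K < K := Nat.mod_lt _ (by omega)
  rcases Nat.eq_or_lt_of_le (Nat.succ_le_of_lt hr) with he | hlt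
  · exact absurd (by rw [hs, show m % K + 1 = K from he]; exact Nat.mod_self K) h
  · have : (m % K + 1) % K = m % K + 1 := Nat.mod_eq_of_lt hlt
    have hmod : (m + 1) % K = m % K + 1 := by rw [hs, this]
    have hle : m % K ≤ m := Nat.mod_le _ _
    exact ⟨hmod, by unfold pvLo; omega⟩

theorem pvSuccModZero {K m : Nat} (hK : 1 ≤ K) :
    (m + 1) % K = 0 ↔ m % K = K - 1 := by
  have hs := pvStep (m := m) hK
  have hr : m % K < K := Nat.mod_lt _ (by omega)
  constructor
  · intro h0
    by_contra hne
    have : m % K + 1 < K := by omega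
    rw [hs, Nat.mod_eq_of_lt this] at h0
    omega
  · intro he
    rw [hs, he]
    have : K - 1 + 1 = K := by omega
    rw [this, Nat.mod_self]

theorem pvModLt {K m : Nat} (hK : 1 ≤ K) : m % K < K := Nat.mod_lt _ (by omega)

-- characterisation of A's first loop
theorem pvLeft_spec (day : List Int) (K : Nat) (hK : 1 ≤ K) (m : Nat) (hm : 1 ≤ m) :
    (List.range m).foldl (idealDaysLeftStep day (K : Int)) (PySem.List.pyGetD day 0 0, []) =
      (pvM day (pvLo K (m - 1)) (m - 1),
       (List.range m).map (fun i => pvM day (pvLo K i) i)) := by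
  induction m with
  | zero => omega
  | succ m ih =>
    rcases Nat.eq_or_lt_of_le hm with h1 | h1
    · have hm0 : m = 0 := by omega
      subst hm0
      simp [idealDaysLeftStep, pvLo, pvM_self, pvG, List.range_succ,
        PySem.List.pyGetD_zero, List.getD]
    · rw [List.range_succ, List.foldl_append, ih (by omega), List.map_append]
      simp only [List.foldl_cons, List.foldl_nil, idealDaysLeftStep, PySem.Int.mod_natCast,
        PySem.List.pyGetD_natCast, Nat.cast_eq_zero, List.map_cons, List.map_nil,
        Nat.add_sub_cancel]
      by_cases h0 : m % K = 0
      · simp only [h0]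
        have hlo : pvLo K m = m := by unfold pvLo; omega
        rw [hlo, pvM_self]
        simp [pvG, List.getD]
      · simp only [if_neg h0]
        have hm1 : m - 1 + 1 = m := by omega
        obtain ⟨-, hlo⟩ := pvSuccMod (m := m - 1) hK (by rw [hm1]; exact h0)
        rw [hm1] at hlo
        have hlole : pvLo K (m - 1) ≤ m - 1 := by unfold pvLo; omega
        have := pvM_succ day (a := pvLo K (m - 1)) (b := m - 1) hlole
        rw [hm1] at this
        rw [hlo, this]
        simp [pvG, List.getD]

-- characterisation of A's second loop, processing i = n-1 down to m (j+1 steps)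
theorem pvRight_aux (day : List Int) (K : Nat) (hK : 1 ≤ K) (n : Nat) :
    ∀ j m, m + j + 1 = n →
    ((List.range' m (n - m)).reverse).foldl (idealDaysRightStep day (K : Int) n)
        (PySem.List.pyGetD day ((n : Int) - 1) 0, []) =
      (pvM day m (pvE K n m),
       (List.range' m (n - m)).map (fun i => pvM day i (pvE K n i))) := by
  intro j
  induction j with
  | zero =>
    intro m hm
    have h2 : n - m = 1 := by omega
    rw [h2]
    have hm' : m = n - 1 := by omega
    subst hm'
    have hE : pvE K n (n - 1) = n - 1 := by
      have := pvModLt (m := n - 1) hK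
      have hle : (n - 1) % K ≤ n - 1 := Nat.mod_le _ _
      unfold pvE pvLo; omega
    simp [idealDaysRightStep, hE, pvM_self, pvG, List.getD]
  | succ j ih =>
    intro m hm
    have hc : n - m = (n - (m + 1)) + 1 := by omega
    have hmlt : m < n - 1 := by omega
    rw [hc, List.range'_succ, List.reverse_cons, List.foldl_append]
    rw [ih (m + 1) (by omega)]
    simp only [List.foldl_cons, List.foldl_nil, idealDaysRightStep]
    have hcast : (m : Int) + 1 = ((m + 1 : Nat) : Int) := by push_cast; ring
    rw [hcast, PySem.Int.mod_natCast]
    simp only [Nat.cast_eq_zero, PySem.List.pyGetD_natCast]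
    rw [show day.getD m 0 = pvG day m from rfl]
    have hne : ¬ (m = n - 1) := by omega
    have hmodle : m % K ≤ m := Nat.mod_le _ _
    by_cases h0 : (m + 1) % K = 0
    · have hE : pvE K n m = m := by
        have hmK : m % K = K - 1 := (pvSuccModZero hK).mp h0
        have := pvModLt (m := m) hK
        unfold pvE pvLo; omega
      rw [List.map_cons, if_pos (Or.inr h0), hE, pvM_self]
    · obtain ⟨-, hlo⟩ := pvSuccMod hK h0
      have hmK : m % K ≠ K - 1 := fun hc' => h0 ((pvSuccModZero hK).mpr hc')
      have hE : pvE K n (m + 1) = pvE K n m := by unfold pvE; rw [hlo]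
      have hmE : m < pvE K n m := by
        have := pvModLt (m := m) hK
        unfold pvE pvLo; omega
      rw [List.map_cons, if_neg (by simp [hne, h0]), hE, max_comm, ← pvM_cons day hmE]

theorem pvRight_spec (day : List Int) (K : Nat) (hK : 1 ≤ K) (n : Nat) (hn : 1 ≤ n) :
    ((List.range n).reverse).foldl (idealDaysRightStep day (K : Int) n)
        (PySem.List.pyGetD day ((n : Int) - 1) 0, []) =
      (pvM day 0 (pvE K n 0),
       (List.range n).map (fun i => pvM day i (pvE K n i))) := by
  have := pvRight_aux day K hK n (n - 1) 0 (by omega)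
  simpa [List.range_eq_range'] using this

-- the crux: "≥ prefix max and ≥ suffix max" is exactly "equals the block max"
theorem pvPointwise (day : List Int) {lo m e : Nat} (h1 : lo ≤ m) (h2 : m ≤ e) :
    (pvM day lo m ≤ pvG day m ∧ pvM day m e ≤ pvG day m) ↔ pvG day m = pvM day lo e := by
  constructor
  · rintro ⟨hA, hB⟩
    refine le_antisymm (pvLe_M day h1 h2) ?_
    rw [pvM_le_iff day (le_trans h1 h2)]
    intro j hj1 hj2
    by_cases hjm : j ≤ m
    · exact le_trans (pvLe_M day hj1 hjm) hA
    · exact le_trans (pvLe_M day (by omega) hj2) hB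
  · intro heq
    constructor
    · rw [pvM_le_iff day h1, heq]
      intro j hj1 hj2
      exact pvLe_M day hj1 (by omega)
    · rw [pvM_le_iff day h2, heq]
      intro j hj1 hj2
      exact pvLe_M day (by omega) hj2

-- (day.drop s).take c as a range'-map of getD
theorem pvDropTake (day : List Int) (s c : Nat) :
    (day.drop s).take c = (List.range' s (min c (day.length - s))).map (fun j => day.getD j 0) := by
  apply List.ext_getElem
  · simp
  · intro j hj1 hj2
    simp only [List.getElem_take, List.getElem_drop, List.getElem_map, List.getElem_range']
    rw [List.getD_eq_getElem]
    · congr 1; omega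
    · simp at hj2 ⊢; omega

-- B's slice max is the block max
theorem pvSliceMax (day : List Int) (K a : Nat) (hK : 1 ≤ K) (ha : a < day.length) :
    (PySem.List.max? (PySem.List.slice day (some (a : Int)) (some ((a : Int) + (K : Int)))) (fun x => x)).getD 0 =
      pvM day a (min (a + K - 1) (day.length - 1)) := by
  rw [PySem.List.slice_natCast_add, pvDropTake]
  have hmin : min K (day.length - a) = (K - 1).min (day.length - 1 - a) + 1 := by
    simp only [Nat.min_def]; split_ifs <;> omega
  rw [hmin, List.range'_succ, List.map_cons, PySem.List.max?_id_cons]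
  simp only [Option.getD_some]
  unfold pvM pvG
  rw [List.foldl_map]
  have hb2 : min (a + K - 1) (day.length - 1) - a = (K - 1).min (day.length - 1 - a) := by
    simp only [Nat.min_def]; split_ifs <;> omega
  rw [hb2]

-- congruence for the shared output loop of the two ports
theorem pvFoldlIfCongr {α β : Type} (L : List α) (f : α → β) (p q : α → Prop)
    [DecidablePred p] [DecidablePred q] (h : ∀ x ∈ L, p x ↔ q x) :
    ∀ acc : List β,
      L.foldl (fun a x => if p x then a ++ [f x] else a) acc =
        L.foldl (fun a x => if q x then a ++ [f x] else a) acc := by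
  induction L with
  | nil => intro acc; rfl
  | cons a t ih =>
    intro acc
    simp only [List.foldl_cons]
    rw [if_congr (h a (List.mem_cons_self)) rfl rfl]
    exact ih (fun x hx => h x (List.mem_cons_of_mem _ hx)) _

-- ===== VERDICT (by name: the statement is the Claim_ definition above) =====
theorem idealDays_spec : Claim_equal_idealDays := by
  intro day k hDom hPre
  obtain ⟨hne, hk1⟩ := hPre
  unfold Spec_idealDays
  lift k to Nat using (by omega) with K
  have hK : 1 ≤ K := by exact_mod_cast hk1
  have hn1 : 1 ≤ day.length := List.length_pos_of_ne_nil hne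
  simp only [idealDays, idealDays_alt]
  rw [pvLeft_spec day K hK day.length hn1, pvRight_spec day K hK day.length hn1]
  apply pvFoldlIfCongr
  intro i hi
  rw [PySem.List.mem_pyRange_one] at hi
  obtain ⟨hiK, hin⟩ := hi
  have h0i : 0 ≤ i := le_trans (by exact_mod_cast Nat.zero_le K) hiK
  obtain ⟨m, rfl⟩ : ∃ m : Nat, i = (m : Int) := ⟨i.toNat, by omega⟩
  have hKm : K ≤ m := by exact_mod_cast hiK
  have hmn : m < day.length - K := by omega
  have hmlen : m < day.length := by omega
  have hlolem : pvLo K m ≤ m := by unfold pvLo; omega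
  have hmodle : m % K ≤ m := Nat.mod_le _ _
  have hmodlt : m % K < K := pvModLt hK
  have hmE : m ≤ pvE K day.length m := by unfold pvE pvLo; omega
  have hgm : PySem.List.pyGetD day (m : Int) 0 = pvG day m := by
    simp [pvG, List.getD]
  have hml : PySem.List.pyGetD ((List.range day.length).map (fun i => pvM day (pvLo K i) i)) (m : Int) 0
      = pvM day (pvLo K m) m := by
    rw [PySem.List.pyGetD_natCast, List.getD_eq_getElem _ _ (by simpa using hmlen)]
    simp
  have hmr : PySem.List.pyGetD ((List.range day.length).map (fun i => pvM day i (pvE K day.length i))) (m : Int) 0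
      = pvM day m (pvE K day.length m) := by
    rw [PySem.List.pyGetD_natCast, List.getD_eq_getElem _ _ (by simpa using hmlen)]
    simp
  have hKpos : (0 : Int) < (K : Int) := by exact_mod_cast hK
  have hcnt : PySem.List.pyRange 0 (day.length : Int) (K : Int) =
      (List.range ((day.length + K - 1) / K)).map (fun j : Nat => 0 + (K : Int) * (j : Int)) := by
    rw [PySem.List.pyRange_of_pos _ _ hKpos, if_pos (by exact_mod_cast hn1 : (0 : Int) < (day.length : Int))]
    have h1 : ((day.length : Int) - 0 + (K : Int) - 1) = ((day.length + K - 1 : Nat) : Int) := by omega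
    have h2 : (((day.length : Int) - 0 + (K : Int) - 1) / (K : Int)).toNat = (day.length + K - 1) / K := by
      rw [h1, ← Int.natCast_div, Int.toNat_natCast]
    rw [h2]
  have hidx : m / K < (day.length + K - 1) / K := by
    have h1 := Nat.div_mul_le_self m K
    have h3 : (m / K + 1) * K = m / K * K + K := by ring
    have h5 : (m / K + 1) * K ≤ day.length + K - 1 := by omega
    exact (Nat.le_div_iff_mul_le (by omega)).mpr h5
  have harg : 0 + (K : Int) * ((m / K : Nat) : Int) = ((pvLo K m : Nat) : Int) := by
    have h4 := Nat.div_add_mod m K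
    unfold pvLo
    push_cast at h4
    omega
  have hbm : PySem.List.pyGetD
      ((PySem.List.pyRange 0 (day.length : Int) (K : Int)).map
        (fun bs => (PySem.List.max? (PySem.List.slice day (some bs) (some (bs + (K : Int)))) (fun x => x)).getD 0))
      (PySem.Int.floordiv (m : Int) (K : Int)) 0 = pvM day (pvLo K m) (pvE K day.length m) := by
    rw [PySem.Int.floordiv_natCast, PySem.List.pyGetD_natCast, hcnt, List.map_map]
    rw [List.getD_eq_getElem _ _ (by simpa using hidx)]
    simp only [List.getElem_map, List.getElem_range, Function.comp_apply]
    rw [harg, pvSliceMax day K (pvLo K m) hK (by omega)]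
    rfl
  rw [hgm, hml, hmr, hbm]
  rw [ge_iff_le, ge_iff_le, beq_iff_eq]
  exact pvPointwise day hlolem hmE
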